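-- pv_equiv track=rewrite | github.com/haokai-xuan/Competitive-Programming | LeetCode/Easy/CountHillsValleysInArray.py | countHillValley
-- ===== SOURCE A (Python) =====
-- from typing import List
--
-- def countHillValley(nums: List[int]) -> int:
--     ans = 0
--     for i in range(1, len(nums) - 1):
--         j = i
--         while j < len(nums) - 1 and nums[j] == nums[i]:
--             j += 1
--         if nums[i - 1] > nums[i] and nums[i] < nums[j]:
--             ans += 1
--         elif nums[i - 1] < nums[i] and nums[i] > nums[j]:
--             ans += 1
--
--         i = j - 1
--
--     return ans
-- ===== SOURCE B (Python) =====
-- def countHillValley(nums):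
--     comp = []
--     for x in nums:
--         if not comp or comp[-1] != x:
--             comp.append(x)
--     ans = 0
--     for a, b, c in zip(comp, comp[1:], comp[2:]):
--         if (a < b and b > c) or (a > b and b < c):
--             ans += 1
--     return ans
-- ===== Notes on version B (the rewrite author's own statement) =====
-- stated objective: faster
-- what changed: Instead of re-scanning forward from every index with an inner while loop to find the next distinct value, B compresses consecutive duplicates once and then counts strict local maxima/minima in a single pass over adjacent triples.
import Mathlib
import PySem

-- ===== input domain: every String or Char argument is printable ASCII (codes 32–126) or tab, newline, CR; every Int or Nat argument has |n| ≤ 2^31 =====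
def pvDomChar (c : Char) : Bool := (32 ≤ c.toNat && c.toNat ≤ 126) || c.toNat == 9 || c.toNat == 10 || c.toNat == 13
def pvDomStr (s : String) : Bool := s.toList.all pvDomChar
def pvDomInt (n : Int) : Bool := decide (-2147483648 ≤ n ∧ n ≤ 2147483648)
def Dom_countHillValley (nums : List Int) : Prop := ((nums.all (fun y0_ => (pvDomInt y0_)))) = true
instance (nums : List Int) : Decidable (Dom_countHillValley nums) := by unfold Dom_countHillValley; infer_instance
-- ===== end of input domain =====

-- B replaces A's per-index rescan for the next distinct value with one duplicate-compression
-- pass followed by a linear scan over adjacent triples (objective: faster).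

-- ===== PORT A =====
-- inner `while j < len(nums)-1 and nums[j] == nums[i]` loop (all accesses are in range, so getD is exact)
def pvFindJ (nums : List Int) (v : Int) (j : Nat) : Nat :=
  if h : j < nums.length - 1 ∧ nums.getD j 0 = v then pvFindJ nums v (j + 1) else j
termination_by nums.length - j
decreasing_by omega

-- the `for i in range(1, len(nums)-1)` loop as tail recursion on i
-- (Python's trailing `i = j - 1` has no effect on a range loop and is omitted)
def pvLoopA (nums : List Int) (i : Nat) (ans : Int) : Int :=
  if h : i < nums.length - 1 then
    -- Python's local `j = pvFindJ …` is inlined at its two use sites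
    pvLoopA nums (i + 1)
      (if nums.getD (i - 1) 0 > nums.getD i 0 ∧ nums.getD i 0 < nums.getD (pvFindJ nums (nums.getD i 0) i) 0 then ans + 1
       else if nums.getD (i - 1) 0 < nums.getD i 0 ∧ nums.getD i 0 > nums.getD (pvFindJ nums (nums.getD i 0) i) 0 then ans + 1
       else ans)
  else ans
termination_by nums.length - i
decreasing_by omega

def countHillValley (nums : List Int) : Int := pvLoopA nums 1 0

-- ===== PORT B =====
-- Source B: compress consecutive duplicates, then count over zip(comp, comp[1:], comp[2:])
def countHillValley_alt (nums : List Int) : Int :=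
  let comp := nums.foldl (fun comp x => if comp = [] ∨ comp.getLast? ≠ some x then comp ++ [x] else comp) ([] : List Int)
  (comp.zip ((comp.drop 1).zip (comp.drop 2))).foldl
    (fun ans t =>
      if (t.1 < t.2.1 ∧ t.2.1 > t.2.2) ∨ (t.1 > t.2.1 ∧ t.2.1 < t.2.2) then ans + 1 else ans) 0

-- ===== PRECONDITION & SPEC =====
def Spec_countHillValley (nums : List Int) (out : Int) : Prop := out = countHillValley_alt nums
instance (nums : List Int) (out : Int) : Decidable (Spec_countHillValley nums out) := by unfold Spec_countHillValley; infer_instance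

-- ===== CLAIM (what is proved, stated in full; the proofs are below) =====
def Claim_equal_countHillValley : Prop := ∀ (nums : List Int), Dom_countHillValley nums → Spec_countHillValley nums (countHillValley nums)

-- ===== LEMMAS AND PROOFS =====

-- indicator of a hill/valley at middle value b between a and c
def pvInd (a b c : Int) : Int := if (a < b ∧ b > c) ∨ (a > b ∧ b < c) then 1 else 0

-- "next distinct" value scanning l, defaulting to x
def pvNd (x : Int) (l : List Int) : Int := (l.find? (fun y => y != x)).getD x

-- structural characterisation of A's outer loop
def pvARec : List Int → Int
  | p :: x :: y :: r => pvInd p x (pvNd x (y :: r)) + pvARec (x :: y :: r)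
  | _ => 0

-- consecutive-duplicate compression with the last kept element as state
def pvDdd (last : Option Int) : List Int → List Int
  | [] => []
  | x :: r => if last ≠ some x then x :: pvDdd (some x) r else pvDdd last r

-- count of hills/valleys over adjacent triples of a (compressed) list
def pvCt : List Int → Int
  | a :: b :: c :: r => pvInd a b c + pvCt (b :: c :: r)
  | _ => 0

theorem pvNd_cons (x c : Int) (l : List Int) :
    pvNd x (c :: l) = if c ≠ x then c else pvNd x l := by
  simp only [pvNd, List.find?_cons]
  by_cases h : c = x
  · simp [h]
  · have hb : (c != x) = true := by simp [h]
    simp [hb, h]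

theorem pvARec_short (l : List Int) (h : l.length ≤ 2) : pvARec l = 0 := by
  match l with
  | [] => rfl
  | [a] => rfl
  | [a, b] => rfl
  | a :: b :: c :: r => simp at h

theorem pvFindJ_spec (nums : List Int) (v : Int) (i : Nat) (hi : i < nums.length) :
    nums.getD (pvFindJ nums v i) 0 = pvNd v (nums.drop i) := by
  rw [pvFindJ]
  have hdrop : nums.drop i = nums.getD i 0 :: nums.drop (i + 1) := by
    rw [List.getD_eq_getElem _ _ hi, List.drop_eq_getElem_cons hi]
  by_cases h : i < nums.length - 1 ∧ nums.getD i 0 = v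
  · rw [dif_pos h, pvFindJ_spec nums v (i + 1) (by omega), hdrop, h.2, pvNd_cons]
    simp
  · rw [dif_neg h, hdrop, pvNd_cons]
    by_cases hv : nums.getD i 0 = v
    · have hlt : ¬ i < nums.length - 1 := fun hh => h ⟨hh, hv⟩
      have hnil : nums.drop (i + 1) = [] := by
        apply List.drop_eq_nil_of_le; omega
      have hc : ¬ (nums.getD i 0 ≠ v) := not_not_intro hv
      rw [if_neg hc, hnil, hv]
      simp [pvNd]
    · rw [if_pos hv]
termination_by nums.length - i
decreasing_by omega

theorem pvLoopA_eq (nums : List Int) (i : Nat) (ans : Int) (h1 : 1 ≤ i) :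
    pvLoopA nums i ans = ans + pvARec (nums.drop (i - 1)) := by
  rw [pvLoopA]
  by_cases h : i < nums.length - 1
  · rw [dif_pos h]
    have hi1 : i - 1 < nums.length := by omega
    have hi : i < nums.length := by omega
    have hi2 : i + 1 < nums.length := by omega
    have e1 : i - 1 + 1 = i := by omega
    have d1 : nums.drop (i - 1) = nums.getD (i - 1) 0 :: nums.drop i := by
      rw [List.getD_eq_getElem _ _ hi1, List.drop_eq_getElem_cons hi1, e1]
    have d2 : nums.drop i = nums.getD i 0 :: nums.drop (i + 1) := by
      rw [List.getD_eq_getElem _ _ hi, List.drop_eq_getElem_cons hi]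
    have d3 : nums.drop (i + 1) = nums.getD (i + 1) 0 :: nums.drop (i + 2) := by
      rw [List.getD_eq_getElem _ _ hi2, List.drop_eq_getElem_cons hi2]
    have hfj : nums.getD (pvFindJ nums (nums.getD i 0) i) 0
        = pvNd (nums.getD i 0) (nums.drop (i + 1)) := by
      rw [pvFindJ_spec nums _ i hi, d2, pvNd_cons]; simp
    rw [pvLoopA_eq nums (i + 1) _ (by omega)]
    have harec : pvARec (nums.drop (i - 1))
        = pvInd (nums.getD (i - 1) 0) (nums.getD i 0) (pvNd (nums.getD i 0) (nums.drop (i + 1)))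
          + pvARec (nums.drop i) := by
      rw [d1, d2, d3, pvARec]
    have hii : i + 1 - 1 = i := by omega
    rw [hii, harec, hfj, pvInd]
    split_ifs <;> first | (exfalso; tauto) | ring
  · rw [dif_neg h]
    have hlen : (nums.drop (i - 1)).length ≤ 2 := by
      simp only [List.length_drop]; omega
    rw [pvARec_short _ hlen]; ring
termination_by nums.length - i
decreasing_by omega

theorem pvDdd_headD (x : Int) (r : List Int) :
    (pvDdd (some x) r).headD x = pvNd x r := by
  induction r generalizing x with
  | nil => simp [pvDdd, pvNd]
  | cons y r' ih =>
    by_cases h : y = x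
    · subst h
      have h1 : pvDdd (some y) (y :: r') = pvDdd (some y) r' := by simp [pvDdd]
      have h2 : pvNd y (y :: r') = pvNd y r' := by rw [pvNd_cons]; simp
      rw [h1, h2, ih]
    · have h1 : pvDdd (some x) (y :: r') = y :: pvDdd (some y) r' := by
        rw [pvDdd, if_pos (fun hc => h (Option.some.inj hc).symm)]
      have h2 : pvNd x (y :: r') = y := by rw [pvNd_cons, if_pos h]
      rw [h1, h2, List.headD_cons]

theorem pvInd_self (p x : Int) : pvInd p x x = 0 := by
  simp [pvInd]

theorem pvInd_left (x c : Int) : pvInd x x c = 0 := by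
  simp [pvInd]

theorem pvARec_ct (l : List Int) : ∀ p : Int, pvARec (p :: l) = pvCt (p :: pvDdd (some p) l) := by
  induction l with
  | nil => intro p; rfl
  | cons x r ih =>
    intro p
    by_cases hpx : x = p
    · subst hpx
      have hdd : pvDdd (some x) (x :: r) = pvDdd (some x) r := by simp [pvDdd]
      rw [hdd, ← ih x]
      match r with
      | [] => rfl
      | y :: r0 =>
        rw [pvARec, pvInd_left]
        exact zero_add _
    · have hdd : pvDdd (some p) (x :: r) = x :: pvDdd (some x) r := by
        rw [pvDdd, if_pos (fun hc => hpx (Option.some.inj hc).symm)]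
      rw [hdd]
      match r with
      | [] => rfl
      | y :: r0 =>
        rw [pvARec, ih x]
        rcases hM : pvDdd (some x) (y :: r0) with _ | ⟨c, M'⟩
        · have hnd : pvNd x (y :: r0) = x := by
            rw [← pvDdd_headD, hM]; rfl
          rw [hnd, pvInd_self]
          simp [pvCt]
        · have hnd : pvNd x (y :: r0) = c := by
            rw [← pvDdd_headD, hM]; rfl
          rw [hnd]
          conv_rhs => rw [pvCt]

theorem pvFold_dd (l : List Int) : ∀ acc : List Int,
    l.foldl (fun comp x => if comp = [] ∨ comp.getLast? ≠ some x then comp ++ [x] else comp) acc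
      = acc ++ pvDdd acc.getLast? l := by
  induction l with
  | nil => intro acc; simp [pvDdd]
  | cons x r ih =>
    intro acc
    by_cases h : acc.getLast? = some x
    · have hne : acc ≠ [] := by intro hn; simp [hn] at h
      simp only [List.foldl_cons, h]
      simp [hne, ih, pvDdd, h]
    · have hc : (acc = [] ∨ acc.getLast? ≠ some x) := Or.inr h
      simp only [List.foldl_cons, if_pos hc]
      rw [ih (acc ++ [x])]
      simp [pvDdd, h]

theorem pvZipFold_ct (l : List Int) : ∀ acc : Int,
    (l.zip ((l.drop 1).zip (l.drop 2))).foldl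
      (fun ans t =>
        if (t.1 < t.2.1 ∧ t.2.1 > t.2.2) ∨ (t.1 > t.2.1 ∧ t.2.1 < t.2.2) then ans + 1 else ans) acc
      = acc + pvCt l := by
  induction l using pvCt.induct with
  | case1 a b c r ih =>
    intro acc
    have hz : (a :: b :: c :: r).zip (((a :: b :: c :: r).drop 1).zip ((a :: b :: c :: r).drop 2))
        = (a, b, c) :: (b :: c :: r).zip (((b :: c :: r).drop 1).zip ((b :: c :: r).drop 2)) := rfl
    rw [hz, List.foldl_cons, ih]
    conv_rhs => rw [pvCt]
    simp only [pvInd]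
    split_ifs <;> ring
  | case2 t h =>
    intro acc
    match t, h with
    | [], _ => simp [pvCt]
    | [a], _ => simp [pvCt]
    | [a, b], _ => simp [pvCt]
    | a :: b :: c :: r, h => exact absurd rfl (h a b c r)

-- ===== VERDICT (by name: the statement is the Claim_ definition above) =====
theorem countHillValley_spec : Claim_equal_countHillValley := by
  intro nums _
  unfold Spec_countHillValley countHillValley countHillValley_alt
  rw [pvLoopA_eq nums 1 0 (le_refl 1)]
  simp only [Nat.sub_self, List.drop_zero, zero_add]
  rw [pvFold_dd nums []]
  simp only [List.getLast?_nil, List.nil_append]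
  rw [pvZipFold_ct, zero_add]
  match nums with
  | [] => rfl
  | a :: r =>
    have : pvDdd none (a :: r) = a :: pvDdd (some a) r := by simp [pvDdd]
    rw [this, ← pvARec_ct]
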